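-- pv_equiv track=rewrite | github.com/diegomarin75/DatabricksSquemaCompare | dbsc.py | FilterSqlComments
-- ===== SOURCE A (Python) =====
-- def FilterSqlComments(SqlText):
--
--   #Init loop
--   Lines=[]
--   SqlText=SqlText.strip(" ")
--
--   #Process lines
--   for Line in SqlText.split("\n"):
--
--     #Trim spaces
--     Line=Line.rstrip(" ")
--
--     #Filter comment lines
--     if Line.lstrip(" ").startswith("--"):
--       Line=""
--
--     #Filter inline comments
--     LitteralMode=False
--     InlineComment=-1
--     for i,c in enumerate(Line):
--       if c=="'" and LitteralMode==False:
--         LitteralMode=True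
--       elif c=="'" and LitteralMode==True:
--         LitteralMode=False
--       if LitteralMode==False:
--         if Line[i:].startswith("--")==True:
--           InlineComment=i
--           break
--     if InlineComment!=-1:
--       Line=Line[:InlineComment].rstrip(" ")
--
--     #Append filtered lines
--     if len(Line)!=0:
--       Lines.append(Line)
--
--   #Return result
--   return "\n".join(Lines)
-- ===== SOURCE B (Python) =====
-- def FilterSqlComments(SqlText):
--   def CutLine(Line):
--     Line = Line.rstrip(" ")
--     Cut = -1
--     Pos = 0
--     while True:
--       d = Line.find("--", Pos)
--       if d == -1:
--         break
--       q = Line.find("'", Pos)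
--       if q == -1 or d < q:
--         Cut = d
--         break
--       e = Line.find("'", q + 1)
--       if e == -1:
--         break
--       Pos = e + 1
--     if Cut != -1:
--       Line = Line[:Cut].rstrip(" ")
--     return Line
--   return "\n".join(l for l in (CutLine(Line) for Line in SqlText.strip(" ").split("\n")) if l)
-- ===== Notes on version B (the rewrite author's own statement) =====
-- stated objective: faster
-- what changed: The per-character quote-toggle state machine (and the redundant leading comment-line filter) is replaced by a jump loop that uses str.find to hop between the next comment marker and the next pair of quote characters, so only occurrence positions are inspected instead of every character.
import Mathlib
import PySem

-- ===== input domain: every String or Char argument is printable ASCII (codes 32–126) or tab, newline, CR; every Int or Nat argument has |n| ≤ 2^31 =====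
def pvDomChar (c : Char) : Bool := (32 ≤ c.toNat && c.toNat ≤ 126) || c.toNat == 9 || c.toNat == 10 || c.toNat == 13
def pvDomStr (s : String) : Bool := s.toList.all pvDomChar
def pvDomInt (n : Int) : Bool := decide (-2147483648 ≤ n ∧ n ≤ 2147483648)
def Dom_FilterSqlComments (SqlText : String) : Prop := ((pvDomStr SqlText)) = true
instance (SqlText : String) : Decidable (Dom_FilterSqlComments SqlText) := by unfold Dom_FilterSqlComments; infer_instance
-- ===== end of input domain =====

-- B replaces A's per-character quote state machine by jumps between str.find occurrences
-- of "--" and "'" (and drops the redundant leading-"--" branch): an alternative algorithm.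

-- exact port of Python str.rstrip(" ") (strip only spaces from the right)
def pvRstripSp (l : List Char) : List Char := (l.reverse.dropWhile (fun c => c == ' ')).reverse
-- exact port of Python str.lstrip(" ")
def pvLstripSp (l : List Char) : List Char := l.dropWhile (fun c => c == ' ')

-- ===== PORT A =====
-- A's inner loop: for i,c in enumerate(Line) with the quote toggle and Line[i:].startswith("--")
def pvScanA (l : List Char) (i : Nat) (mode : Bool) : Int :=
  match l with
  | [] => -1
  | c :: t =>
    let m := if c == '\'' && mode == false then true
             else if c == '\'' && mode == true then false
             else mode
    if m == false && PySem.Chars.startswith (c :: t) ['-', '-'] then (i : Int)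
    else pvScanA t (i + 1) m

def pvLineA (Line : List Char) : List Char :=
  let Line := pvRstripSp Line
  let Line := if PySem.Chars.startswith (pvLstripSp Line) ['-', '-'] then [] else Line
  let ic := pvScanA Line 0 false
  if ic ≠ -1 then pvRstripSp (PySem.List.slice Line none (some ic)) else Line

def FilterSqlComments (SqlText : String) : String :=
  let txt := PySem.Chars.stripChars SqlText.toList [' ']
  let Lines := (PySem.Chars.splitOn txt ['\n']).foldl
    (fun acc line =>
      let f := pvLineA line
      if f.length != 0 then acc ++ [f] else acc) ([] : List (List Char))
  String.ofList (PySem.Chars.join ['\n'] Lines)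

-- ===== PORT B =====
-- Source B's while-True loop; the fuel argument only makes the loop total (Pos grows each round)
def pvCutLoop (Line : List Char) (fuel : Nat) (Pos : Int) : Int :=
  match fuel with
  | 0 => -1
  | fuel + 1 =>
    let d := PySem.Chars.findFrom Line ['-', '-'] Pos
    if d = -1 then -1
    else
      let q := PySem.Chars.findFrom Line ['\''] Pos
      if q = -1 ∨ d < q then d
      else
        let e := PySem.Chars.findFrom Line ['\''] (q + 1)
        if e = -1 then -1
        else pvCutLoop Line fuel (e + 1)

def pvLineB (Line : List Char) : List Char :=
  let Line := pvRstripSp Line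
  let Cut := pvCutLoop Line (Line.length + 1) 0
  if Cut ≠ -1 then pvRstripSp (PySem.List.slice Line none (some Cut)) else Line

def FilterSqlComments_alt (SqlText : String) : String :=
  String.ofList (PySem.Chars.join ['\n']
    (((PySem.Chars.splitOn (PySem.Chars.stripChars SqlText.toList [' ']) ['\n']).map pvLineB).filter
      (fun l => !l.isEmpty)))

-- ===== PRECONDITION & SPEC =====
def Spec_FilterSqlComments (SqlText : String) (out : String) : Prop := out = FilterSqlComments_alt SqlText
instance (SqlText : String) (out : String) : Decidable (Spec_FilterSqlComments SqlText out) := by unfold Spec_FilterSqlComments; infer_instance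

-- ===== CLAIM (what is proved, stated in full; the proofs are below) =====
def Claim_equal_FilterSqlComments : Prop := ∀ (SqlText : String), Dom_FilterSqlComments SqlText → Spec_FilterSqlComments SqlText (FilterSqlComments SqlText)

-- ===== LEMMAS AND PROOFS =====

theorem pv_single_prefix_iff (a : Char) (m : List Char) : [a] <+: m ↔ m[0]? = some a := by
  cases m with
  | nil => simp
  | cons b t => simp [List.cons_prefix_iff]

theorem pv_single_prefix_drop_iff (a : Char) (l : List Char) (i : Nat) :
    [a] <+: l.drop i ↔ l[i]? = some a := by
  rw [pv_single_prefix_iff]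
  simp [List.getElem?_drop]

theorem pv_mem_infix {a : Char} {m : List Char} (h : a ∈ m) : [a] <:+: m := by
  obtain ⟨s, t, rfl⟩ := List.append_of_mem h
  exact ⟨s, t, by simp⟩

theorem pv_infix_of_prefix_drop {s l : List Char} {pos i : Nat} (hpi : pos ≤ i)
    (h : s <+: l.drop i) : s <:+: l.drop pos := by
  obtain ⟨t, ht⟩ := h
  refine ⟨(l.drop pos).take (i - pos), t, ?_⟩
  have hdd : l.drop i = (l.drop pos).drop (i - pos) := by
    rw [List.drop_drop]; congr 1; omega
  rw [List.append_assoc, ht, hdd, List.take_append_drop]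

theorem pv_startswith_false {c s : Char} (t ss : List Char) (h : c ≠ s) :
    PySem.Chars.startswith (c :: t) (s :: ss) = false := by
  rw [Bool.eq_false_iff]
  intro hs
  rw [PySem.Chars.startswith_iff, List.cons_prefix_iff] at hs
  obtain ⟨l', hl, -⟩ := hs
  exact h (by injection hl)

-- scanA step lemmas
theorem pv_scan_step_false {l : List Char} {pos : Nat} {c : Char} (h : l[pos]? = some c)
    (hq : c ≠ '\'') (hm : ¬ (['-', '-'] <+: l.drop pos)) :
    pvScanA (l.drop pos) pos false = pvScanA (l.drop (pos + 1)) (pos + 1) false := by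
  have hlt : pos < l.length := by
    rcases Nat.lt_or_ge pos l.length with h' | h'
    · exact h'
    · rw [List.getElem?_eq_none h'] at h; cases h
  have hdrop : l.drop pos = c :: l.drop (pos + 1) := by
    rw [List.drop_eq_getElem_cons hlt]
    have : l[pos] = c := by simpa [List.getElem?_eq_getElem hlt] using h
    rw [this]
  rw [hdrop] at hm ⊢
  have hsw : PySem.Chars.startswith (c :: l.drop (pos + 1)) ['-', '-'] = false := by
    rw [Bool.eq_false_iff]
    intro hs
    exact hm ((PySem.Chars.startswith_iff _ _).mp hs)
  simp [pvScanA, hq, hsw]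

theorem pv_scan_step_true {l : List Char} {pos : Nat} {c : Char} (h : l[pos]? = some c)
    (hq : c ≠ '\'') :
    pvScanA (l.drop pos) pos true = pvScanA (l.drop (pos + 1)) (pos + 1) true := by
  have hlt : pos < l.length := by
    rcases Nat.lt_or_ge pos l.length with h' | h'
    · exact h'
    · rw [List.getElem?_eq_none h'] at h; cases h
  have hdrop : l.drop pos = c :: l.drop (pos + 1) := by
    rw [List.drop_eq_getElem_cons hlt]
    have : l[pos] = c := by simpa [List.getElem?_eq_getElem hlt] using h
    rw [this]
  rw [hdrop]
  simp [pvScanA, hq]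

theorem pv_scan_quote {l : List Char} {pos : Nat} (h : l[pos]? = some '\'') (mode : Bool) :
    pvScanA (l.drop pos) pos mode = pvScanA (l.drop (pos + 1)) (pos + 1) (!mode) := by
  have hlt : pos < l.length := by
    rcases Nat.lt_or_ge pos l.length with h' | h'
    · exact h'
    · rw [List.getElem?_eq_none h'] at h; cases h
  have hdrop : l.drop pos = '\'' :: l.drop (pos + 1) := by
    rw [List.drop_eq_getElem_cons hlt]
    have : l[pos] = '\'' := by simpa [List.getElem?_eq_getElem hlt] using h
    rw [this]
  rw [hdrop]
  have hsw : PySem.Chars.startswith ('\'' :: l.drop (pos + 1)) ['-', '-'] = false :=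
    pv_startswith_false _ _ (by decide)
  cases mode <;> simp [pvScanA, hsw]

theorem pv_scan_quote_f {l : List Char} {pos : Nat} (h : l[pos]? = some '\'') :
    pvScanA (l.drop pos) pos false = pvScanA (l.drop (pos + 1)) (pos + 1) true := by
  simpa using pv_scan_quote h false

theorem pv_scan_quote_t {l : List Char} {pos : Nat} (h : l[pos]? = some '\'') :
    pvScanA (l.drop pos) pos true = pvScanA (l.drop (pos + 1)) (pos + 1) false := by
  simpa using pv_scan_quote h true

-- walking over a region with no quotes (and, in false mode, no "--")
theorem pv_walk_false (l : List Char) (a b : Nat) (hab : a ≤ b) (hb : b ≤ l.length)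
    (hq : ∀ i, a ≤ i → i < b → l[i]? ≠ some '\'')
    (hm : ∀ i, a ≤ i → i < b → ¬ (['-', '-'] <+: l.drop i)) :
    pvScanA (l.drop a) a false = pvScanA (l.drop b) b false := by
  induction b, hab using Nat.le_induction with
  | base => rfl
  | succ b hab ih =>
    have hb' : b ≤ l.length := by omega
    have hlt : b < l.length := by omega
    have hc : l[b]? = some l[b] := List.getElem?_eq_getElem hlt
    have hne : l[b] ≠ '\'' := by
      intro hcontra
      exact hq b hab (by omega) (by rw [hc, hcontra])
    rw [ih hb' (fun i h1 h2 => hq i h1 (by omega)) (fun i h1 h2 => hm i h1 (by omega))]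
    exact pv_scan_step_false hc hne (hm b hab (by omega))

theorem pv_walk_true (l : List Char) (a b : Nat) (hab : a ≤ b) (hb : b ≤ l.length)
    (hq : ∀ i, a ≤ i → i < b → l[i]? ≠ some '\'') :
    pvScanA (l.drop a) a true = pvScanA (l.drop b) b true := by
  induction b, hab using Nat.le_induction with
  | base => rfl
  | succ b hab ih =>
    have hlt : b < l.length := by omega
    have hc : l[b]? = some l[b] := List.getElem?_eq_getElem hlt
    have hne : l[b] ≠ '\'' := by
      intro hcontra
      exact hq b hab (by omega) (by rw [hc, hcontra])
    rw [ih (by omega) (fun i h1 h2 => hq i h1 (by omega))]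
    exact pv_scan_step_true hc hne

theorem pv_scan_none_of_no_dashdash (l : List Char) :
    ∀ (i : Nat) (mode : Bool), ¬ (['-', '-'] <:+: l) → pvScanA l i mode = -1 := by
  induction l with
  | nil => intro i mode h; rfl
  | cons c t ih =>
    intro i mode h
    have hsw : PySem.Chars.startswith (c :: t) ['-', '-'] = false := by
      rw [Bool.eq_false_iff]
      intro hs
      obtain ⟨u, hu⟩ := (PySem.Chars.startswith_iff _ _).mp hs
      exact h ⟨[], u, by simp [← hu]⟩
    have ht : ¬ (['-', '-'] <:+: t) := by
      intro hc
      obtain ⟨u, v, huv⟩ := hc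
      exact h ⟨c :: u, v, by simp [← huv]⟩
    simp [pvScanA, hsw]
    exact ih _ _ ht

theorem pv_scan_true_none_of_no_quote (l : List Char) :
    ∀ (i : Nat), '\'' ∉ l → pvScanA l i true = -1 := by
  induction l with
  | nil => intro i h; rfl
  | cons c t ih =>
    intro i h
    have hc : c ≠ '\'' := fun hc => h (by simp [hc])
    simp [pvScanA, hc]
    exact ih _ (fun hm => h (List.mem_cons_of_mem _ hm))

theorem pv_scan_match_at {l : List Char} {d : Nat} (h : ['-', '-'] <+: l.drop d) :
    pvScanA (l.drop d) d false = (d : Int) := by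
  obtain ⟨t, ht⟩ := h
  rw [show ['-', '-'] ++ t = '-' :: ('-' :: t) from rfl] at ht
  rw [← ht]
  have hsw : PySem.Chars.startswith ('-' :: '-' :: t) ['-', '-'] = true := by
    rw [PySem.Chars.startswith_iff]
    exact ⟨t, rfl⟩
  simp [pvScanA, hsw]

-- the main bridge: B's find-jump loop computes A's state-machine scan
theorem pv_bridge (l : List Char) (fuel : Nat) :
    ∀ pos : Nat, pos ≤ l.length → l.length - pos < fuel →
      pvCutLoop l fuel (pos : Int) = pvScanA (l.drop pos) pos false := by
  induction fuel with
  | zero => intro pos _ h; omega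
  | succ fuel ih =>
    intro pos hpos hfuel
    rw [pvCutLoop]
    by_cases hd : PySem.Chars.findFrom l ['-', '-'] (pos : Int) = -1
    · rw [if_pos hd]
      have hnin : ¬ (['-', '-'] <:+: l.drop pos) :=
        (PySem.Chars.findFrom_natCast_eq_neg_one_iff l _ pos hpos).mp hd
      rw [pv_scan_none_of_no_dashdash _ _ _ hnin]
    · rw [if_neg hd]
      obtain ⟨hdpos, hdpre, hdmin⟩ := PySem.Chars.findFrom_natCast_spec l ['-', '-'] pos hpos hd
      set d := PySem.Chars.findFrom l ['-', '-'] (pos : Int) with hd_def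
      have hd0 : 0 ≤ d := le_trans (by positivity) hdpos
      have hdlen : d.toNat < l.length := by
        by_contra hc
        rw [List.drop_eq_nil_of_le (by omega)] at hdpre
        exact absurd (List.prefix_nil.mp hdpre) (by simp)
      by_cases hq : PySem.Chars.findFrom l ['\''] (pos : Int) = -1 ∨
          d < PySem.Chars.findFrom l ['\''] (pos : Int)
      · rw [if_pos hq]
        -- no quote before d: scan walks to d and matches there
        have hnoq : ∀ i, pos ≤ i → i < d.toNat → l[i]? ≠ some '\'' := by
          intro i h1 h2 hcontra
          have hpre : ['\''] <+: l.drop i := (pv_single_prefix_drop_iff _ _ _).mpr hcontra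
          rcases hq with hq | hq
          · exact (PySem.Chars.findFrom_natCast_eq_neg_one_iff l _ pos hpos).mp hq
              (pv_infix_of_prefix_drop h1 hpre)
          · have hqne : PySem.Chars.findFrom l ['\''] (pos : Int) ≠ -1 := by
              intro h0; rw [h0] at hq; omega
            obtain ⟨hq1, hq2, hqmin⟩ := PySem.Chars.findFrom_natCast_spec l ['\''] pos hpos hqne
            exact hqmin i h1 (by omega) hpre
        have hnom : ∀ i, pos ≤ i → i < d.toNat → ¬ (['-', '-'] <+: l.drop i) :=
          fun i h1 h2 => hdmin i h1 h2
        rw [pv_walk_false l pos d.toNat (by omega) (by omega) hnoq hnom,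
          pv_scan_match_at hdpre]
        omega
      · rw [if_neg hq]
        rw [not_or, not_lt] at hq
        obtain ⟨hqne, hqd⟩ := hq
        obtain ⟨hq1, hq2, hqmin⟩ := PySem.Chars.findFrom_natCast_spec l ['\''] pos hpos hqne
        set q := PySem.Chars.findFrom l ['\''] (pos : Int) with hq_def
        have hq0 : 0 ≤ q := le_trans (by positivity) hq1
        have hqlen : q.toNat < l.length := by
          by_contra hc
          rw [List.drop_eq_nil_of_le (by omega)] at hq2
          exact absurd (List.prefix_nil.mp hq2) (by simp)
        have hqget : l[q.toNat]? = some '\'' := (pv_single_prefix_drop_iff _ _ _).mp hq2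
        -- walk in false mode to q, toggling there
        have hnoq : ∀ i, pos ≤ i → i < q.toNat → l[i]? ≠ some '\'' := by
          intro i h1 h2 hcontra
          exact hqmin i h1 h2 ((pv_single_prefix_drop_iff _ _ _).mpr hcontra)
        have hnom : ∀ i, pos ≤ i → i < q.toNat → ¬ (['-', '-'] <+: l.drop i) := by
          intro i h1 h2
          exact hdmin i h1 (by omega)
        rw [pv_walk_false l pos q.toNat (by omega) (by omega) hnoq hnom,
          pv_scan_quote_f hqget]
        have hql : q.toNat + 1 ≤ l.length := by omega
        have hcast : q + 1 = ((q.toNat + 1 : Nat) : Int) := by omega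
        rw [hcast]
        by_cases he : PySem.Chars.findFrom l ['\''] (((q.toNat + 1 : Nat) : Int)) = -1
        · rw [if_pos he]
          have hnin : ¬ (['\''] <:+: l.drop (q.toNat + 1)) :=
            (PySem.Chars.findFrom_natCast_eq_neg_one_iff l _ (q.toNat + 1) hql).mp he
          have hmem : '\'' ∉ l.drop (q.toNat + 1) := fun hm => hnin (pv_mem_infix hm)
          exact (pv_scan_true_none_of_no_quote _ _ hmem).symm
        · rw [if_neg he]
          obtain ⟨he1, he2, hemin⟩ := PySem.Chars.findFrom_natCast_spec l ['\''] (q.toNat + 1) hql he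
          set e := PySem.Chars.findFrom l ['\''] ((q.toNat + 1 : Nat) : Int) with he_def
          have he0 : 0 ≤ e := le_trans (by positivity) he1
          have helen : e.toNat < l.length := by
            by_contra hc
            rw [List.drop_eq_nil_of_le (by omega)] at he2
            exact absurd (List.prefix_nil.mp he2) (by simp)
          have heget : l[e.toNat]? = some '\'' := (pv_single_prefix_drop_iff _ _ _).mp he2
          have hnoq2 : ∀ i, q.toNat + 1 ≤ i → i < e.toNat → l[i]? ≠ some '\'' := by
            intro i h1 h2 hcontra
            exact hemin i h1 h2 ((pv_single_prefix_drop_iff _ _ _).mpr hcontra)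
          rw [pv_walk_true l (q.toNat + 1) e.toNat (by omega) (by omega) hnoq2,
            pv_scan_quote_t heget]
          have hcast2 : e + 1 = ((e.toNat + 1 : Nat) : Int) := by omega
          rw [hcast2]
          exact ih (e.toNat + 1) (by omega) (by omega)

theorem pv_cut_eq (l : List Char) : pvCutLoop l (l.length + 1) 0 = pvScanA l 0 false := by
  have := pv_bridge l (l.length + 1) 0 (by omega) (by omega)
  simpa using this

theorem pv_rstrip_nil_of_spaces {m : List Char} (h : ∀ c ∈ m, c = ' ') : pvRstripSp m = [] := by
  unfold pvRstripSp
  rw [List.dropWhile_eq_nil_iff.mpr, List.reverse_nil]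
  intro x hx
  simp [h x (List.mem_reverse.mp hx)]

theorem pv_scan_spaces (u v : List Char) (i : Nat) (hu : ∀ c ∈ u, c = ' ')
    (hv : ['-', '-'] <+: v) : pvScanA (u ++ v) i false = ((i + u.length : Nat) : Int) := by
  induction u generalizing i with
  | nil =>
    obtain ⟨t, ht⟩ := hv
    rw [show ['-', '-'] ++ t = '-' :: ('-' :: t) from rfl] at ht
    simp only [List.nil_append, ← ht]
    have hsw : PySem.Chars.startswith ('-' :: '-' :: t) ['-', '-'] = true := by
      rw [PySem.Chars.startswith_iff]; exact ⟨t, rfl⟩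
    simp [pvScanA, hsw]
  | cons c u' ih =>
    have hc : c = ' ' := hu c (by simp)
    subst hc
    have hsw : PySem.Chars.startswith (' ' :: (u' ++ v)) ['-', '-'] = false :=
      pv_startswith_false _ _ (by decide)
    rw [List.cons_append,
      show pvScanA (' ' :: (u' ++ v)) i false = pvScanA (u' ++ v) (i + 1) false from by
        simp [pvScanA, hsw],
      ih (i + 1) (fun x hx => hu x (by simp [hx]))]
    simp only [List.length_cons]
    omega

-- the per-line results agree
theorem pv_line_eq (line : List Char) : pvLineA line = pvLineB line := by
  simp only [pvLineA, pvLineB]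
  rw [pv_cut_eq]
  set r := pvRstripSp line with hr
  by_cases h : PySem.Chars.startswith (pvLstripSp r) ['-', '-'] = true
  · rw [if_pos h]
    -- A empties the line; B's scan cuts at the end of the leading spaces, leaving spaces only
    have hsplit : r = r.takeWhile (fun c => c == ' ') ++ r.dropWhile (fun c => c == ' ') :=
      (List.takeWhile_append_dropWhile).symm
    have hu : ∀ c ∈ r.takeWhile (fun c => c == ' '), c = ' ' := by
      intro c hc
      have := List.mem_takeWhile_imp hc
      simpa using this
    have hv : ['-', '-'] <+: r.dropWhile (fun c => c == ' ') :=
      (PySem.Chars.startswith_iff _ _).mp h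
    have hscan : pvScanA r 0 false = (((r.takeWhile (fun c => c == ' ')).length : Nat) : Int) := by
      calc pvScanA r 0 false
          = pvScanA (r.takeWhile (fun c => c == ' ') ++ r.dropWhile (fun c => c == ' ')) 0 false := by
            rw [← hsplit]
        _ = ((0 + (r.takeWhile (fun c => c == ' ')).length : Nat) : Int) := pv_scan_spaces _ _ 0 hu hv
        _ = (((r.takeWhile (fun c => c == ' ')).length : Nat) : Int) := by simp
    have hscan_nil : pvScanA ([] : List Char) 0 false = -1 := rfl
    rw [hscan_nil]
    simp only [ne_eq, not_true_eq_false, if_false, hscan]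
    rw [if_pos (by omega : ¬ (((r.takeWhile (fun c => c == ' ')).length : Nat) : Int) = -1)]
    rw [PySem.List.slice_to_natCast]
    have htake : r.take (r.takeWhile (fun c => c == ' ')).length = r.takeWhile (fun c => c == ' ') :=
      (List.prefix_iff_eq_take.mp (List.takeWhile_prefix _)).symm
    rw [htake, pv_rstrip_nil_of_spaces hu]
  · rw [if_neg h]

-- helper for the outer loops: append-loop = filter∘map
theorem pv_fold_filter (ls : List (List Char)) (acc : List (List Char)) :
    ls.foldl (fun acc line => let f := pvLineA line; if f.length != 0 then acc ++ [f] else acc) acc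
      = acc ++ (ls.map pvLineB).filter (fun l => !l.isEmpty) := by
  induction ls generalizing acc with
  | nil => simp
  | cons x t ih =>
    simp only [List.foldl_cons, List.map_cons, List.filter_cons]
    rw [pv_line_eq x]
    by_cases hx : pvLineB x = []
    · have h1 : ((pvLineB x).length != 0) = false := by simp [hx]
      have h2 : (!(pvLineB x).isEmpty) = false := by simp [hx]
      rw [ih]
      simp [h1, h2]
    · have h1 : ((pvLineB x).length != 0) = true := by
        simp [List.length_eq_zero_iff, hx]
      have h2 : (!(pvLineB x).isEmpty) = true := by
        simp [hx]
      rw [ih]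
      simp [h1, h2]

-- ===== VERDICT (by name: the statement is the Claim_ definition above) =====
theorem FilterSqlComments_spec : Claim_equal_FilterSqlComments := by
  intro SqlText _
  unfold Spec_FilterSqlComments
  simp only [FilterSqlComments, FilterSqlComments_alt]
  rw [pv_fold_filter]
  simp
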